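-- pv_equiv track=rewrite | github.com/AlejandroOrtizCor/CTBot-v2 | App/Other_Functions/parsemods.py | parse
-- ===== SOURCE A (Python) =====
-- def parse(mods):
--     mods = [mod.lower() for mod in mods]
--     total = 0
--     if "ez" in mods:
--         total+=2
--     if "hr" in mods:
--         total+=16
--     if "dt" in mods:
--         total+=64
--     if "ht" in mods:
--         total+=256
--     if "nc" in mods:
--         total+=512
--     return total
-- ===== SOURCE B (Python) =====
-- TABLE = {'ez': 2, 'hr': 16, 'dt': 64, 'ht': 256, 'nc': 512}
--
-- def parse(mods):
--     return sum(TABLE.get(m, 0) for m in {mod.lower() for mod in mods})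
-- ===== Notes on version B (the rewrite author's own statement) =====
-- stated objective: simpler
-- what changed: Replaces the five fixed membership scans over the lowered list by one pass over the deduplicated (set) input summing bitflags from a lookup table.
import Mathlib
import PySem

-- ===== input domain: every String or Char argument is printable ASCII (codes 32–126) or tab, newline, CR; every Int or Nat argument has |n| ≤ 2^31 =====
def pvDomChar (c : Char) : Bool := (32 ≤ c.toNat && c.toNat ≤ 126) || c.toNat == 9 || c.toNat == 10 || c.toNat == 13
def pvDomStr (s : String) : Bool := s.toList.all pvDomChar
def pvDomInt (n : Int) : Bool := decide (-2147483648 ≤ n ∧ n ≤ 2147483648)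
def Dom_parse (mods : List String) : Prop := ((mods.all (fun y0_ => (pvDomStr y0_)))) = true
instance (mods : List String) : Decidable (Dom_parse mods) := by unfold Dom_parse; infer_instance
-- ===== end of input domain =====

-- B replaces A's five fixed membership scans by one pass over the deduplicated
-- lowered input that sums bitflags from a lookup table (objective: simpler).

-- ===== PORT A =====
def parse (mods : List String) : Int :=
  let ms := mods.map PySem.Str.lower
  let total : Int := 0
  let total := if "ez" ∈ ms then total + 2 else total
  let total := if "hr" ∈ ms then total + 16 else total
  let total := if "dt" ∈ ms then total + 64 else total
  let total := if "ht" ∈ ms then total + 256 else total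
  let total := if "nc" ∈ ms then total + 512 else total
  total

-- ===== PORT B =====
def pvTable : PySem.Dict String Int :=
  PySem.Dict.mk [("ez", 2), ("hr", 16), ("dt", 64), ("ht", 256), ("nc", 512)]

def parse_alt (mods : List String) : Int :=
  (PySem.Set.ofList (mods.map PySem.Str.lower)).foldl
    (fun acc m => acc + pvTable.getD m 0) 0

-- ===== PRECONDITION & SPEC =====
def Spec_parse (mods : List String) (out : Int) : Prop := out = parse_alt mods
instance (mods : List String) (out : Int) : Decidable (Spec_parse mods out) := by unfold Spec_parse; infer_instance

-- ===== CLAIM (what is proved, stated in full; the proofs are below) =====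
def Claim_equal_parse : Prop := ∀ (mods : List String), Dom_parse mods → Spec_parse mods (parse mods)

-- ===== LEMMAS AND PROOFS =====

-- One table lookup as nested ifs
theorem pvTable_getD (m : String) :
    pvTable.getD m 0 =
      if m = "ez" then 2 else if m = "hr" then 16 else if m = "dt" then 64
      else if m = "ht" then 256 else if m = "nc" then 512 else 0 := by
  simp only [pvTable, PySem.Dict.getD_eq_get?_getD, PySem.Dict.get?_mk_cons, beq_iff_eq]
  by_cases h1 : m = "ez" <;> by_cases h2 : m = "hr" <;> by_cases h3 : m = "dt" <;>
    by_cases h4 : m = "ht" <;> by_cases h5 : m = "nc" <;>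
    simp_all [PySem.Dict.get?, eq_comm]

-- One table lookup as a sum of indicator terms
theorem pvTable_getD_ind (m : String) :
    pvTable.getD m 0 =
      2 * (if "ez" = m then (1:Int) else 0) + 16 * (if "hr" = m then 1 else 0) +
      64 * (if "dt" = m then 1 else 0) + 256 * (if "ht" = m then 1 else 0) +
      512 * (if "nc" = m then 1 else 0) := by
  rw [pvTable_getD]
  by_cases h1 : m = "ez" <;> by_cases h2 : m = "hr" <;> by_cases h3 : m = "dt" <;>
    by_cases h4 : m = "ht" <;> by_cases h5 : m = "nc" <;> simp_all [eq_comm]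

-- count over a cons, cast to Int, as a +indicator step
theorem pv_cast_count_cons (a m : String) (t : List String) :
    (((m :: t).count a : Nat) : Int) = (t.count a : Int) + (if a = m then 1 else 0) := by
  rw [List.count_cons]
  by_cases h : a = m
  · simp [h]
  · simp [h, Ne.symm h]

-- Summing table lookups over any list = weighted occurrence counts
theorem pv_sum_count (L : List String) :
    (L.map (fun m => pvTable.getD m 0)).sum =
      2 * (L.count "ez" : Int) + 16 * (L.count "hr" : Int) +
      64 * (L.count "dt" : Int) + 256 * (L.count "ht" : Int) +
      512 * (L.count "nc" : Int) := by
  induction L with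
  | nil => simp
  | cons m t ih =>
    rw [List.map_cons, List.sum_cons, ih, pvTable_getD_ind, pv_cast_count_cons,
      pv_cast_count_cons, pv_cast_count_cons, pv_cast_count_cons, pv_cast_count_cons]
    ring

-- On a duplicate-free list the count is a membership indicator
theorem pv_count_nodup (L : List String) (h : L.Nodup) (a : String) :
    (L.count a : Int) = if a ∈ L then 1 else 0 := by
  split_ifs with hm
  · exact_mod_cast List.count_eq_one_of_mem h hm
  · simp [List.count_eq_zero_of_not_mem hm]

-- Summing table lookups over a duplicate-free list = membership indicators
theorem pv_sum_nodup (L : List String) (h : L.Nodup) :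
    (L.map (fun m => pvTable.getD m 0)).sum =
      (if "ez" ∈ L then (2:Int) else 0) + (if "hr" ∈ L then 16 else 0) +
      (if "dt" ∈ L then 64 else 0) + (if "ht" ∈ L then 256 else 0) +
      (if "nc" ∈ L then 512 else 0) := by
  rw [pv_sum_count, pv_count_nodup L h, pv_count_nodup L h, pv_count_nodup L h,
    pv_count_nodup L h, pv_count_nodup L h]
  split_ifs <;> ring

-- ===== VERDICT (by name: the statement is the Claim_ definition above) =====
theorem parse_spec : Claim_equal_parse := by
  intro mods _
  unfold Spec_parse parse parse_alt
  rw [PySem.List.foldl_add, pv_sum_nodup _ (PySem.Set.nodup_ofList _)]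
  simp only [PySem.Set.mem_ofList]
  split_ifs <;> ring
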